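-- pv_equiv track=rewrite | github.com/ivan1016017/LeetCodeAlgorithmProblems | src/my_project/easy_problems/from1to50/find_and_replace_pattern.py | toCommonString
-- ===== SOURCE A (Python) =====
-- from typing import List
--
-- def toCommonString(word: str) -> str:
--
--
--     temp_list: List[str] = list()
--
--     for letter in word:
--         if letter not in temp_list:
--             temp_list.append(letter)
--
--     new_dic: dict = dict()
--     for i, j in enumerate(temp_list):
--         new_dic[j] = str(i)
--
--
--     temp: str = ""
--     for i in word:
--         temp += new_dic[i]
--
--     return temp
-- ===== SOURCE B (Python) =====
-- def toCommonString(word: str) -> str: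
--     # map each distinct character to its first-occurrence position
--     first = {c: word.index(c) for c in set(word)}
--     # rank of each first-occurrence position among the sorted distinct positions
--     rank = {p: i for i, p in enumerate(sorted(first.values()))}
--     return "".join(str(rank[first[c]]) for c in word)
-- ===== Notes on version B (the rewrite author's own statement) =====
-- stated objective: alternative
-- what changed: Instead of A's scan-and-append dedup list with membership rescans and an enumeration dictionary, B maps each distinct character to its first-occurrence position, sorts the distinct positions once to rank them, and emits the rank of each character's first occurrence.
import Mathlib
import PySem

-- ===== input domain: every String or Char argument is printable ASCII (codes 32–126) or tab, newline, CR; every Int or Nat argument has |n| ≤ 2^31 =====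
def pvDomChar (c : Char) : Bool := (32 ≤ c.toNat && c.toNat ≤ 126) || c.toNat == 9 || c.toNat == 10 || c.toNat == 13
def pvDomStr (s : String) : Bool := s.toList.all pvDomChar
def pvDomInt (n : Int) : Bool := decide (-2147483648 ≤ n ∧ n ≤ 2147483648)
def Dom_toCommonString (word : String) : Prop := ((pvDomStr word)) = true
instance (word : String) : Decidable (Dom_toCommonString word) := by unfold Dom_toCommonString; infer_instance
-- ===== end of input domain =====

-- B replaces A's scan-and-append dedup list and index dictionary by a first-occurrence-position
-- map whose distinct positions are sorted once and ranked; same return value (alternative decomposition).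

-- ===== PORT A =====
-- temp_list: append each letter on first sight
def pvTempList (l : List Char) : List Char :=
  l.foldl (fun acc c => if c ∈ acc then acc else acc ++ [c]) []
-- new_dic: letter -> str(position in temp_list)
def pvNewDic (l : List Char) : PySem.Dict Char String :=
  (PySem.List.enumerate (pvTempList l)).foldl
    (fun d p => d.insert p.2 (PySem.Int.toStr p.1)) PySem.Dict.empty
-- new_dic[i] raises KeyError only on a missing key; every character of word is in temp_list,
-- hence a key of new_dic, so the getD default "" is never used and the port is exact.
def toCommonString (word : String) : String :=
  String.ofList (word.toList.foldl
    (fun s c => s ++ ((pvNewDic word.toList).getD c "").toList) [])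

-- ===== PORT B =====
-- word.index(c): first-occurrence position (c always occurs, so the getD default 0 is never used)
def pvFIdx (l : List Char) (c : Char) : Int := (((PySem.List.index? l c).getD 0 : Nat) : Int)
-- first = {c: word.index(c) for c in set(word)}
def pvFirst (l : List Char) : PySem.Dict Char Int :=
  PySem.Dict.ofList ((PySem.Set.ofList l).map (fun c => (c, pvFIdx l c)))
-- rank = {p: i for i, p in enumerate(sorted(first.values()))}
def pvRanks (l : List Char) : PySem.Dict Int Int :=
  PySem.Dict.ofList
    ((PySem.List.enumerate (PySem.List.sorted (pvFirst l).values (fun x => x) false)).map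
      (fun p => (p.2, p.1)))
def toCommonString_alt (word : String) : String :=
  PySem.Str.join "" (word.toList.map
    (fun c => PySem.Int.toStr ((pvRanks word.toList).getD ((pvFirst word.toList).getD c 0) 0)))

-- ===== PRECONDITION & SPEC =====
def Spec_toCommonString (word : String) (out : String) : Prop := out = toCommonString_alt word
instance (word : String) (out : String) : Decidable (Spec_toCommonString word out) := by unfold Spec_toCommonString; infer_instance

-- ===== CLAIM (what is proved, stated in full; the proofs are below) =====
def Claim_equal_toCommonString : Prop := ∀ (word : String), Dom_toCommonString word → Spec_toCommonString word (toCommonString word)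

-- ===== LEMMAS AND PROOFS =====

lemma pv_flatten_intersperse (ls : List (List Char)) :
    (List.intersperse [] ls).flatten = ls.flatten := by
  induction ls with
  | nil => rfl
  | cons h t ih =>
    cases t with
    | nil => simp
    | cons h2 t2 => simp_all [List.intersperse]

lemma pv_join_nil (ls : List (List Char)) : PySem.Chars.join [] ls = ls.flatten := by
  simp only [PySem.Chars.join, List.intercalate]
  exact pv_flatten_intersperse ls

lemma pv_tempList_eq (l : List Char) : pvTempList l = PySem.Set.ofList l := by
  have h : (fun (acc : List Char) c => if c ∈ acc then acc else acc ++ [c]) = PySem.Set.add := by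
    funext acc c
    simp [PySem.Set.add, PySem.Set.contains]
  rw [pvTempList, h, PySem.Set.ofList_eq_foldl]

lemma pv_items_mapDict {α β : Type} [BEq α] [LawfulBEq α] (g : α → β) (tl : List α)
    (hnd : tl.Nodup) :
    (tl.foldl (fun d x => d.insert x (g x)) PySem.Dict.empty).items
      = tl.map (fun x => (x, g x)) := by
  have hfresh : ∀ a ∈ tl, (PySem.Dict.empty : PySem.Dict α β).contains a = false := by
    intro a _; simp [PySem.Dict.contains_empty]
  have h := PySem.Dict.items_foldl_insert_fresh tl (fun a => a) g PySem.Dict.empty hfresh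
    (by simpa [Function.comp_def] using hnd)
  simpa using h

lemma pv_getD_mapDict {α β : Type} [BEq α] [LawfulBEq α] (g : α → β) (tl : List α)
    (hnd : tl.Nodup) (c : α) (hc : c ∈ tl) (dflt : β) :
    (tl.foldl (fun d x => d.insert x (g x)) PySem.Dict.empty).getD c dflt = g c := by
  have hitems := pv_items_mapDict g tl hnd
  have hknd : (tl.foldl (fun d x => d.insert x (g x)) PySem.Dict.empty).keys.Nodup := by
    simp only [PySem.Dict.keys, hitems, List.map_map]
    simpa [Function.comp_def] using hnd
  have hmem : (c, g c) ∈ (tl.foldl (fun d x => d.insert x (g x)) PySem.Dict.empty).items := by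
    rw [hitems]; exact List.mem_map.mpr ⟨c, hc, rfl⟩
  exact PySem.Dict.getD_of_mem_items _ hmem hknd dflt

lemma pv_getD_enumFold {α β : Type} [BEq α] [LawfulBEq α] (f : Int → β) (tl : List α)
    (hnd : tl.Nodup) (j : Nat) (hj : j < tl.length) (dflt : β) :
    ((PySem.List.enumerate tl).foldl (fun d p => d.insert p.2 (f p.1))
        PySem.Dict.empty).getD tl[j] dflt = f (j : Int) := by
  have hfresh : ∀ a ∈ PySem.List.enumerate tl,
      (PySem.Dict.empty : PySem.Dict α β).contains a.2 = false := by
    intro a _; simp [PySem.Dict.contains_empty]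
  have hkeys2 : ((PySem.List.enumerate tl).map (fun p => p.2)).Nodup := by
    simpa [PySem.List.map_snd_enumerate] using hnd
  have hitems := PySem.Dict.items_foldl_insert_fresh (PySem.List.enumerate tl)
    (fun p => p.2) (fun p => f p.1) PySem.Dict.empty hfresh hkeys2
  simp only [show (PySem.Dict.empty : PySem.Dict α β).items = [] from rfl,
    List.nil_append] at hitems
  have hknd : ((PySem.List.enumerate tl).foldl (fun d p => d.insert p.2 (f p.1))
      PySem.Dict.empty).keys.Nodup := by
    simp only [PySem.Dict.keys, hitems, List.map_map]
    simpa [Function.comp_def, PySem.List.map_snd_enumerate] using hnd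
  have hj' : j < (PySem.List.enumerate tl).length := by
    simpa [PySem.List.length_enumerate] using hj
  have hmem : ((tl[j], f (j : Int)) : α × β) ∈ ((PySem.List.enumerate tl).foldl
      (fun d p => d.insert p.2 (f p.1)) PySem.Dict.empty).items := by
    rw [hitems]
    refine List.mem_map.mpr ⟨(PySem.List.enumerate tl)[j], List.getElem_mem hj', ?_⟩
    simp [PySem.List.getElem_enumerate]
  exact PySem.Dict.getD_of_mem_items _ hmem hknd dflt

lemma pv_fIdx_some (l : List Char) (c : Char) (hc : c ∈ l) :
    ∃ k : Nat, PySem.List.index? l c = some k ∧ ∃ hk : k < l.length, l[k] = c := by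
  obtain ⟨k, hk⟩ := Option.isSome_iff_exists.mp ((PySem.List.index?_isSome_iff l c).mpr hc)
  obtain ⟨hlt, hget, -⟩ := PySem.List.getElem_of_index?_eq_some hk
  exact ⟨k, hk, hlt, hget⟩

lemma pv_fIdx_lt_length (l : List Char) (c : Char) (hc : c ∈ l) :
    pvFIdx l c < (l.length : Int) := by
  obtain ⟨k, hk, hlt, -⟩ := pv_fIdx_some l c hc
  simp only [pvFIdx, hk, Option.getD_some]
  exact_mod_cast hlt

lemma pv_fIdx_append (l t : List Char) (c : Char) (hc : c ∈ l) :
    pvFIdx (l ++ t) c = pvFIdx l c := by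
  simp only [pvFIdx, PySem.List.index?_append_of_mem t hc]

lemma pv_mono (l : List Char) :
    (PySem.Set.ofList l).Pairwise (fun a b => pvFIdx l a < pvFIdx l b) := by
  induction l using List.reverseRecOn with
  | nil => simp [PySem.Set.ofList]
  | append_singleton l' c ih =>
    have hof : PySem.Set.ofList (l' ++ [c]) = PySem.Set.add (PySem.Set.ofList l') c := by
      rw [PySem.Set.ofList_eq_foldl, PySem.Set.ofList_eq_foldl, List.foldl_append]
      rfl
    have hmem : ∀ a, a ∈ PySem.Set.ofList l' → a ∈ l' := by
      intro a ha; exact (PySem.Set.mem_ofList l' a).mp ha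
    by_cases hc : c ∈ l'
    · have hadd : PySem.Set.add (PySem.Set.ofList l') c = PySem.Set.ofList l' := by
        simp [PySem.Set.add, PySem.Set.contains, PySem.Set.mem_ofList, hc]
      rw [hof, hadd]
      refine ih.imp_of_mem ?_
      intro a b ha hb hab
      rw [pv_fIdx_append l' [c] a (hmem a ha), pv_fIdx_append l' [c] b (hmem b hb)]
      exact hab
    · have hadd : PySem.Set.add (PySem.Set.ofList l') c = PySem.Set.ofList l' ++ [c] := by
        simp [PySem.Set.add, PySem.Set.contains, PySem.Set.mem_ofList, hc]
      rw [hof, hadd, List.pairwise_append]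
      refine ⟨ih.imp_of_mem ?_, List.pairwise_singleton _ _, ?_⟩
      · intro a b ha hb hab
        rw [pv_fIdx_append l' [c] a (hmem a ha), pv_fIdx_append l' [c] b (hmem b hb)]
        exact hab
      · intro a ha b hb
        have hb' : b = c := by simpa using hb
        rw [hb']
        have hcc : pvFIdx (l' ++ [c]) c = (l'.length : Int) := by
          simp only [pvFIdx, PySem.List.index?_append_singleton_self l' c hc,
            Option.getD_some]
        rw [pv_fIdx_append l' [c] a (hmem a ha), hcc]
        exact pv_fIdx_lt_length l' a (hmem a ha)

lemma pv_first_fold (l : List Char) : pvFirst l = (PySem.Set.ofList l).foldl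
    (fun d x => d.insert x (pvFIdx l x)) PySem.Dict.empty := by
  rw [pvFirst]
  rw [show ∀ (pairs : List (Char × Int)), PySem.Dict.ofList pairs
      = pairs.foldl (fun d p => d.insert p.1 p.2) PySem.Dict.empty from fun _ => rfl]
  rw [List.foldl_map]

lemma pv_first_getD (l : List Char) (c : Char) (hc : c ∈ l) :
    (pvFirst l).getD c 0 = pvFIdx l c := by
  rw [pv_first_fold]
  exact pv_getD_mapDict _ _ (PySem.Set.nodup_ofList l) c ((PySem.Set.mem_ofList l c).mpr hc) 0

lemma pv_first_values (l : List Char) :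
    (pvFirst l).values = (PySem.Set.ofList l).map (fun c => pvFIdx l c) := by
  rw [pv_first_fold]
  simp only [PySem.Dict.values, pv_items_mapDict _ _ (PySem.Set.nodup_ofList l), List.map_map]
  rfl

-- ===== VERDICT (by name: the statement is the Claim_ definition above) =====
theorem toCommonString_spec : Claim_equal_toCommonString := by
  intro word _
  unfold Spec_toCommonString toCommonString toCommonString_alt
  set l := word.toList with hl
  have hnd : (PySem.Set.ofList l).Nodup := PySem.Set.nodup_ofList l
  have hVpair : ((PySem.Set.ofList l).map (fun c => pvFIdx l c)).Pairwise (· < ·) :=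
    (List.pairwise_map).mpr (pv_mono l)
  have hVnd : ((PySem.Set.ofList l).map (fun c => pvFIdx l c)).Nodup :=
    hVpair.imp (fun h => ne_of_lt h)
  have hsorted : PySem.List.sorted (pvFirst l).values (fun x => x) false
      = (PySem.Set.ofList l).map (fun c => pvFIdx l c) := by
    rw [pv_first_values]
    exact PySem.List.sorted_eq_of_perm_of_pairwise_lt _ _ _ (List.Perm.refl _) hVpair
  have hchar : ∀ c ∈ l, (pvNewDic l).getD c ""
      = PySem.Int.toStr ((pvRanks l).getD ((pvFirst l).getD c 0) 0) := by
    intro c hc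
    have hcd : c ∈ PySem.Set.ofList l := (PySem.Set.mem_ofList l c).mpr hc
    obtain ⟨j, hjlt, hdlj⟩ := List.mem_iff_getElem.mp hcd
    have hA : (pvNewDic l).getD c "" = PySem.Int.toStr (j : Int) := by
      rw [pvNewDic, pv_tempList_eq, ← hdlj]
      exact pv_getD_enumFold PySem.Int.toStr _ hnd j hjlt ""
    have hjV : j < ((PySem.Set.ofList l).map (fun c => pvFIdx l c)).length := by
      simpa using hjlt
    have hfc : (pvFirst l).getD c 0
        = ((PySem.Set.ofList l).map (fun c => pvFIdx l c))[j] := by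
      rw [pv_first_getD l c hc]
      simp [hdlj]
    have hB : (pvRanks l).getD ((pvFirst l).getD c 0) 0 = (j : Int) := by
      rw [hfc, pvRanks, hsorted]
      rw [show ∀ (pairs : List (Int × Int)), PySem.Dict.ofList pairs
          = pairs.foldl (fun d p => d.insert p.1 p.2) PySem.Dict.empty from fun _ => rfl]
      rw [List.foldl_map]
      exact pv_getD_enumFold (fun x => x) _ hVnd j hjV 0
    rw [hA, hB]
  have hAside : l.foldl (fun s c => s ++ ((pvNewDic l).getD c "").toList) []
      = l.flatMap (fun c => ((pvNewDic l).getD c "").toList) := by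
    simpa using PySem.List.foldl_append_eq_flatMap
      (fun c => ((pvNewDic l).getD c "").toList) l []
  rw [hAside]
  have hflat : l.flatMap (fun c => ((pvNewDic l).getD c "").toList)
      = l.flatMap (fun c =>
          (PySem.Int.toStr ((pvRanks l).getD ((pvFirst l).getD c 0) 0)).toList) := by
    unfold List.flatMap
    rw [List.map_congr_left (fun c hcmem => by rw [hchar c hcmem])]
  rw [hflat]
  simp [PySem.Str.join, pv_join_nil, List.flatMap, List.map_map, Function.comp_def,
    PySem.Int.toStr]
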